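-- pv_equiv track=rewrite | github.com/Akamemz/King_Pieces_demo | app/pages/new_ver_king_chessboard_app.py | horizontal_strips
-- ===== SOURCE A (Python) =====
-- from typing import Dict, List, Tuple
--
-- Region = Tuple[int, int, int, int]  # (r0, r1, c0, c1)
--
-- def horizontal_strips(n: int, k: int) -> List[Region]:
--     moats = k - 1
--     usable = n - moats
--     if usable <= 0:
--         return []
--     base_h, extra = divmod(usable, k)
--     heights = [base_h + (1 if i < extra else 0) for i in range(k)]
--
--     regions: List[Region] = []
--     r = 0
--     for h in heights:
--         r0 = r
--         r1 = r0 + h - 1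
--         regions.append((r0, r1, 0, n - 1))
--         r = r1 + 2  # moat row
--     return regions
-- ===== SOURCE B (Python) =====
-- from typing import List, Tuple
--
-- Region = Tuple[int, int, int, int]
--
-- def horizontal_strips(n: int, k: int) -> List[Region]:
--     usable = n - (k - 1)
--     if usable <= 0:
--         return []
--     q, r = divmod(usable, k)
--
--     def strip(i: int) -> Region:
--         start = i * q + min(i, r) + i  # heights of prior strips + one moat row each
--         height = q + (1 if i < r else 0)
--         return (start, start + height - 1, 0, n - 1)
--
--     return [strip(i) for i in range(k)]
-- ===== Notes on version B (the rewrite author's own statement) =====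
-- stated objective: alternative
-- what changed: B maps a closed-form formula over the strip indices (start row = i*q + min(i,r) + i), eliminating A's precomputed heights list, append accumulator and threaded row variable.
import Mathlib
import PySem

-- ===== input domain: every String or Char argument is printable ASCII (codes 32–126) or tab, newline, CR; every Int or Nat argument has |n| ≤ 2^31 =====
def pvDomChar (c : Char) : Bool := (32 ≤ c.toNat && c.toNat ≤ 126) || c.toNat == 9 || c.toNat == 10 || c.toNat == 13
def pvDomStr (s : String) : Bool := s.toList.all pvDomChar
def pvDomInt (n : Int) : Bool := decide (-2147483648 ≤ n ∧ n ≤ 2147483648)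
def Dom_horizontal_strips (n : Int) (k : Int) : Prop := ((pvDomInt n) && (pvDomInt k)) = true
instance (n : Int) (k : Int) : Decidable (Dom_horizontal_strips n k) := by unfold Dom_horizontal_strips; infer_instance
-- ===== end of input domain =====

-- B maps a closed-form formula over the strip indices (start row = i*q + min(i,r) + i),
-- eliminating A's heights list, append accumulator and threaded row variable (objective: alternative).


-- ===== PORT A =====
def horizontal_strips (n : Int) (k : Int) : List (Int × Int × Int × Int) :=
  let moats := k - 1
  let usable := n - moats
  if usable ≤ 0 then []
  else
    match PySem.Int.divmod? usable k with
    | none => []   -- unreachable under Pre_ (Python raises ZeroDivisionError here)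
    | some (base_h, extra) =>
      let heights := (PySem.List.pyRange 0 k 1).map (fun i => base_h + (if i < extra then 1 else 0))
      (heights.foldl (fun (st : List (Int × Int × Int × Int) × Int) h =>
          let r0 := st.2
          let r1 := r0 + h - 1
          (st.1 ++ [(r0, r1, 0, n - 1)], r1 + 2)) ([], 0)).1

-- ===== PORT B =====
-- helper `strip(i)` from Source B: the i-th region from a closed-form start row
def pvStrip (n q r : Int) (i : Int) : Int × Int × Int × Int :=
  let start := i * q + min i r + i
  let height := q + (if i < r then 1 else 0)
  (start, start + height - 1, 0, n - 1)

def horizontal_strips_alt (n : Int) (k : Int) : List (Int × Int × Int × Int) :=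
  let usable := n - (k - 1)
  if usable ≤ 0 then []
  else
    match PySem.Int.divmod? usable k with
    | none => []   -- unreachable under Pre_ (Python raises ZeroDivisionError here)
    | some (q, r) => (PySem.List.pyRange 0 k 1).map (pvStrip n q r)

-- ===== PRECONDITION & SPEC =====
-- Pre_ excludes exactly k = 0 with n ≥ 0 (then usable = n + 1 > 0), where Python's divmod raises ZeroDivisionError.
def Pre_horizontal_strips (n : Int) (k : Int) : Prop := k ≠ 0 ∨ n < 0
instance (n : Int) (k : Int) : Decidable (Pre_horizontal_strips n k) := by unfold Pre_horizontal_strips; infer_instance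
def pvWitness_horizontal_strips : Int × Int := (8, 3)

def Spec_horizontal_strips (n : Int) (k : Int) (out : List (Int × Int × Int × Int)) : Prop := out = horizontal_strips_alt n k
instance (n : Int) (k : Int) (out : List (Int × Int × Int × Int)) : Decidable (Spec_horizontal_strips n k out) := by unfold Spec_horizontal_strips; infer_instance

-- ===== CLAIM (what is proved, stated in full; the proofs are below) =====
def Claim_equal_horizontal_strips : Prop := ∀ (n : Int) (k : Int), Dom_horizontal_strips n k → Pre_horizontal_strips n k → Spec_horizontal_strips n k (horizontal_strips n k)

-- ===== LEMMAS AND PROOFS =====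

-- the closed-form start row of strip j (B's `start`)
def pvStart (q r j : Int) : Int := j * q + min j r + j

-- A's fold over the index segment [j, k) with carried row `pvStart q r j` and accumulator
-- `acc` produces `acc ++` B's mapped list over the same segment.
theorem pv_fold_eq_map (n q r k : Int) :
    ∀ (m : Nat) (j : Int) (acc : List (Int × Int × Int × Int)), j + (m : Int) = k →
    (((PySem.List.pyRange j k 1).map (fun i => q + (if i < r then 1 else 0))).foldl
        (fun (st : List (Int × Int × Int × Int) × Int) h =>
          let r0 := st.2
          let r1 := r0 + h - 1
          (st.1 ++ [(r0, r1, 0, n - 1)], r1 + 2)) (acc, pvStart q r j)).1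
    = acc ++ (PySem.List.pyRange j k 1).map (pvStrip n q r) := by
  intro m
  induction m with
  | zero =>
    intro j acc hj
    rw [PySem.List.pyRange_one_eq_nil (by omega)]
    simp
  | succ m ih =>
    intro j acc hj
    have hlt : j < k := by omega
    rw [PySem.List.pyRange_one_cons hlt]
    simp only [List.map_cons, List.foldl_cons]
    have hnext : pvStart q r j + (q + (if j < r then 1 else 0)) - 1 + 2 = pvStart q r (j + 1) := by
      unfold pvStart
      have : (j + 1) * q = j * q + q := by ring
      rw [this]
      split_ifs with h <;> omega
    have htup : (pvStart q r j, pvStart q r j + (q + (if j < r then 1 else 0)) - 1, 0, n - 1)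
        = pvStrip n q r j := by
      unfold pvStrip pvStart
      rfl
    rw [hnext, htup, ih (j + 1) (acc ++ [pvStrip n q r j]) (by omega)]
    simp

-- ===== VERDICT (by name: the statement is the Claim_ definition above) =====
theorem horizontal_strips_spec : Claim_equal_horizontal_strips := by
  intro n k _ hpre
  unfold Spec_horizontal_strips horizontal_strips horizontal_strips_alt
  simp only []
  split
  · rfl
  · rename_i hpos
    cases hdm : PySem.Int.divmod? (n - (k - 1)) k with
    | none => rfl
    | some p =>
      obtain ⟨q, r⟩ := p
      dsimp only
      by_cases hk : k ≤ 0
      · rw [PySem.List.pyRange_one_eq_nil hk]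
        rfl
      · rw [not_le] at hk
        have hr : 0 ≤ r := by
          simp [PySem.Int.divmod?, hk.ne'] at hdm
          exact hdm.2 ▸ PySem.Int.mod_nonneg (n - (k - 1)) hk
        have := pv_fold_eq_map n q r k k.toNat 0 [] (by omega)
        rw [show pvStart q r 0 = 0 from by unfold pvStart; simp; omega] at this
        simpa using this
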